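-- pv_equiv track=rewrite | github.com/mace141/Notes | Data Structures & Algorithms/structy.py | parenthetical_possibilities
-- ===== SOURCE A (Python) =====
-- def parenthetical_possibilities(s):
--   if len(s) == 0:
--     return ['']
--
--   remaining, chars = get_options(s)
--   options = parenthetical_possibilities(remaining)
--   possibilities = []
--   for char in chars:
--     possibilities += [char + suffix for suffix in options]
--   return possibilities
--
-- def get_options(s):
--   if s[0] == '(':
--     idx = s.index(')')
--     chars = s[1:idx]
--     remaining = s[idx + 1:]
--     return (remaining, chars)
--   else:
--     return (s[1:], s[0])
-- ===== SOURCE B (Python) =====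
-- def parenthetical_possibilities(s):
--   # Parse once into alternative groups, then take an iterative Cartesian product.
--   groups = []
--   i = 0
--   while i < len(s):
--     if s[i] == '(':
--       j = s.index(')', i)
--       groups.append(list(s[i + 1:j]))
--       i = j + 1
--     else:
--       groups.append([s[i]])
--       i += 1
--   acc = ['']
--   for g in groups:
--     acc = [p + c for p in acc for c in g]
--   return acc
-- ===== Notes on version B (the rewrite author's own statement) =====
-- stated objective: simpler
-- what changed: Replaces A's recursive suffix-product (re-parsing one group per recursive call and prepending a character to every suffix of the recursively built tail product) by a single iterative parse into a list of groups followed by a left-fold Cartesian product over growing prefixes.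
import Mathlib
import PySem

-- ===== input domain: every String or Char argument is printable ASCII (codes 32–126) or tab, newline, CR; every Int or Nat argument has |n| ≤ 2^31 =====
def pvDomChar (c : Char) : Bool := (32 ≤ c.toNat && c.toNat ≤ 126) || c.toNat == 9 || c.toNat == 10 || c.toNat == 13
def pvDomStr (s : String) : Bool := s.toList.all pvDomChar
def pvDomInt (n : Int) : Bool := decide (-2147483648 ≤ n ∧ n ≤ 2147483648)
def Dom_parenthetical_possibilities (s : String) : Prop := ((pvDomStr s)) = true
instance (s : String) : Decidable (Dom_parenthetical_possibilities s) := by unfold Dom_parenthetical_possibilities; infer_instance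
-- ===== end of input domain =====

-- B changes the decomposition for simplicity: a single parsing pass into alternative
-- groups followed by an iterative Cartesian product, instead of A's recursive suffix product.

-- ===== PORT A =====
-- get_options(s): on '(' cut out s[1:s.index(')')]; else a one-character group.
-- Returns none where Python's s.index(')') raises ValueError (excluded by Pre_).
def pvGetOptionsA (cs : List Char) : Option (List Char × List Char) :=
  match cs with
  | [] => none
  | c :: rest =>
    if c = '(' then
      match PySem.List.index? (c :: rest) ')' with
      | none => none  -- Python: ValueError from s.index(')')
      | some idx => some ((c :: rest).drop (idx + 1), ((c :: rest).take idx).drop 1)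
    else some (rest, [c])

theorem pvGetOptionsA_length {cs rem chars : List Char}
    (h : pvGetOptionsA cs = some (rem, chars)) : rem.length < cs.length := by
  match cs with
  | [] => simp [pvGetOptionsA] at h
  | c :: rest =>
    by_cases hc : c = '('
    · simp only [pvGetOptionsA, if_pos hc] at h
      cases hi : PySem.List.index? (c :: rest) ')' with
      | none => rw [hi] at h; simp at h
      | some idx =>
        rw [hi] at h
        simp only [Option.some.injEq, Prod.mk.injEq] at h
        obtain ⟨h1, _⟩ := h
        subst h1
        simp only [List.length_drop, List.length_cons]
        omega
    · simp only [pvGetOptionsA, if_neg hc, Option.some.injEq, Prod.mk.injEq] at h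
      obtain ⟨h1, _⟩ := h
      subst h1
      simp

-- recursive body of A, on List Char
def pvA : List Char → List (List Char)
  | [] => [[]]
  | c :: rest =>
    match h : pvGetOptionsA (c :: rest) with
    | none => []  -- Python: ValueError (excluded by Pre_)
    | some (remaining, chars) =>
      let options := pvA remaining
      chars.foldl (fun poss ch => poss ++ options.map (fun suf => ch :: suf)) []
termination_by cs => cs.length
decreasing_by exact pvGetOptionsA_length h

def parenthetical_possibilities (s : String) : List String :=
  (pvA s.toList).map (fun cs => String.ofList cs)

-- ===== PORT B =====
-- one pass: parse s into the list of alternative groups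
def pvParse : List Char → List (List Char)
  | [] => []
  | c :: rest =>
    if c = '(' then
      match PySem.List.index? rest ')' with
      | none => []  -- Python: ValueError from s.index(')', i) (excluded by Pre_)
      | some k => rest.take k :: pvParse (rest.drop (k + 1))
    else [c] :: pvParse rest
termination_by cs => cs.length
decreasing_by
  · simp only [List.length_cons, List.length_drop]; omega
  · simp

-- iterative Cartesian product: acc = [p + c for p in acc for c in g]
def pvProd (groups : List (List Char)) : List (List Char) :=
  groups.foldl (fun acc g => acc.flatMap (fun p => g.map (fun c => p ++ [c]))) [[]]

def parenthetical_possibilities_alt (s : String) : List String :=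
  (pvProd (pvParse s.toList)).map (fun cs => String.ofList cs)

-- ===== PRECONDITION & SPEC =====
-- Pre_ excludes exactly the inputs on which Python A (and Python B) raise ValueError from
-- s.index(')'): it requires every '(' in s to have a ')' somewhere after it.
def Pre_parenthetical_possibilities (s : String) : Prop :=
  ∀ i, i < s.toList.length → s.toList.getD i ' ' = '(' → ')' ∈ s.toList.drop (i + 1)
instance (s : String) : Decidable (Pre_parenthetical_possibilities s) := by
  unfold Pre_parenthetical_possibilities; infer_instance

def pvWitness_parenthetical_possibilities : String := "a(bc)d"

def Spec_parenthetical_possibilities (s : String) (out : List String) : Prop := out = parenthetical_possibilities_alt s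
instance (s : String) (out : List String) : Decidable (Spec_parenthetical_possibilities s out) := by unfold Spec_parenthetical_possibilities; infer_instance

-- ===== CLAIM (what is proved, stated in full; the proofs are below) =====
def Claim_equal_parenthetical_possibilities : Prop := ∀ (s : String), Dom_parenthetical_possibilities s → Pre_parenthetical_possibilities s → Spec_parenthetical_possibilities s (parenthetical_possibilities s)

-- ===== LEMMAS AND PROOFS =====

-- the scan A performs succeeds exactly when it never hits a '(' without a later ')'
def pvWF : List Char → Bool
  | [] => true
  | c :: rest =>
    if c = '(' then
      match PySem.List.index? rest ')' with
      | none => false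
      | some k => pvWF (rest.drop (k + 1))
    else pvWF rest
termination_by cs => cs.length
decreasing_by
  · simp only [List.length_cons, List.length_drop]; omega
  · simp


theorem getD_drop_shift (l : List Char) (n i : Nat) :
    (l.drop n).getD i ' ' = l.getD (n + i) ' ' := by
  simp [List.getD_eq_getElem?_getD, List.getElem?_drop]

theorem pre_imp_pvWF (l : List Char)
    (hp : ∀ i, i < l.length → l.getD i ' ' = '(' → ')' ∈ l.drop (i + 1)) : pvWF l = true := by
  induction l using pvWF.induct with
  | case1 => rw [pvWF]
  | case2 rest hnone =>
    have h0 := hp 0 (by simp) (by simp)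
    rw [PySem.List.index?_eq_none_iff] at hnone
    simp at h0
    exact absurd h0 hnone
  | case3 rest k hi ih =>
    rw [pvWF, if_pos rfl, hi]
    apply ih
    intro i hilen hchar
    have := hp (i + k + 2) (by simp only [List.length_drop] at hilen; simp; omega)
      (by
        have hshift : (('(' :: rest).drop (k + 2)).getD i ' ' = ('(' :: rest).getD (k + 2 + i) ' ' :=
          getD_drop_shift _ _ _
        simp only [List.drop_succ_cons] at hshift
        rw [show i + k + 2 = k + 2 + i by omega, ← hshift]
        simpa using hchar)
    have hmem : ')' ∈ ('(' :: rest).drop (i + k + 3) := this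
    rw [show (('(' :: rest).drop (i + k + 3)) = (rest.drop (k + 1)).drop (i + 1) by
      simp [List.drop_drop]; congr 1; omega] at hmem
    exact hmem
  | case4 c rest hc ih =>
    rw [pvWF, if_neg hc]
    apply ih
    intro i hilen hchar
    have := hp (i + 1) (by simpa using Nat.succ_lt_succ hilen) (by simpa using hchar)
    simpa using this

-- right-recursive Cartesian product (the shape A computes)
def pvProdR : List (List Char) → List (List Char)
  | [] => [[]]
  | g :: gs => g.flatMap (fun c => (pvProdR gs).map (fun suf => c :: suf))

theorem pvProd_step (groups : List (List Char)) (acc : List (List Char)) :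
    groups.foldl (fun acc g => acc.flatMap (fun p => g.map (fun c => p ++ [c]))) acc
      = acc.flatMap (fun p => (pvProdR groups).map (fun q => p ++ q)) := by
  induction groups generalizing acc with
  | nil => simp [pvProdR]
  | cons g gs ih =>
    simp only [List.foldl_cons, ih, pvProdR]
    simp [List.flatMap_assoc, List.map_flatMap, List.flatMap_map, List.append_assoc,
      Function.comp_def]

theorem pvProd_eq_pvProdR (groups : List (List Char)) : pvProd groups = pvProdR groups := by
  simp [pvProd, pvProd_step]

theorem pvA_of_some (c : Char) (rest rem chars : List Char)
    (hg : pvGetOptionsA (c :: rest) = some (rem, chars)) :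
    pvA (c :: rest) = chars.foldl (fun poss ch => poss ++ (pvA rem).map (fun suf => ch :: suf)) [] := by
  rw [pvA]
  split
  · rename_i h'; rw [hg] at h'; cases h'
  · rename_i rem' chars' h'
    rw [hg] at h'
    injection h' with h2
    injection h2 with ha hb
    subst ha; subst hb
    rfl

theorem pvA_foldl (chars : List Char) (opts acc : List (List Char)) :
    chars.foldl (fun poss ch => poss ++ opts.map (fun suf => ch :: suf)) acc
      = acc ++ chars.flatMap (fun ch => opts.map (fun suf => ch :: suf)) :=
  PySem.List.foldl_append_eq_flatMap _ _ _

theorem pvA_eq (cs : List Char) (hwf : pvWF cs = true) : pvA cs = pvProdR (pvParse cs) := by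
  induction cs using pvWF.induct with
  | case1 => simp [pvA, pvParse, pvProdR]
  | case2 rest hnone =>
    rw [pvWF, if_pos rfl, hnone] at hwf
    exact absurd hwf (by simp)
  | case3 rest k hi ih =>
    have hwf' : pvWF (rest.drop (k + 1)) = true := by
      rw [pvWF, if_pos rfl, hi] at hwf; exact hwf
    have hidx : PySem.List.index? ('(' :: rest) ')' = some (k + 1) := by
      simp only [PySem.List.index?_eq_idxOf?] at hi ⊢
      simp [List.idxOf?_cons, hi]
    have hidx2 : List.idxOf? ')' ('(' :: rest) = some (k + 1) := by
      rw [← PySem.List.index?_eq_idxOf?]; exact hidx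
    have hget : pvGetOptionsA ('(' :: rest) = some (rest.drop (k + 1), rest.take k) := by
      simp only [pvGetOptionsA, PySem.List.index?_eq_idxOf?]
      rw [hidx2]
      simp [List.take_succ_cons]
    rw [pvA_of_some _ _ _ _ hget, pvA_foldl, ih hwf', pvParse, if_pos rfl, hi]
    simp [pvProdR]
  | case4 c rest hc ih =>
    have hwf' : pvWF rest = true := by rw [pvWF, if_neg hc] at hwf; exact hwf
    have hget : pvGetOptionsA (c :: rest) = some (rest, [c]) := by
      simp only [pvGetOptionsA, if_neg hc]
    rw [pvA_of_some _ _ _ _ hget, pvA_foldl, ih hwf', pvParse, if_neg hc]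
    simp [pvProdR]

-- ===== VERDICT (by name: the statement is the Claim_ definition above) =====
theorem parenthetical_possibilities_spec : Claim_equal_parenthetical_possibilities := by
  intro s _ hpre
  unfold Spec_parenthetical_possibilities parenthetical_possibilities parenthetical_possibilities_alt
  rw [pvProd_eq_pvProdR, pvA_eq s.toList (pre_imp_pvWF s.toList hpre)]
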